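-- pv_equiv track=rewrite | github.com/rquiroga83/agromodel | extractores/09_extraer_municipios_dane.py | _primer_campo_presente
-- ===== SOURCE A (Python) =====
-- def _primer_campo_presente(props, candidatos):
--     """Devuelve el primer campo de `candidatos` que exista en `props`."""
--     if not props:
--         return None
--     # Normalizar keys a minusculas para matching case-insensitive
--     props_lower = {k.lower(): k for k in props.keys()}
--     for cand in candidatos:
--         if cand.lower() in props_lower:
--             return props_lower[cand.lower()]
--     return None
-- ===== SOURCE B (Python) =====
-- def _primer_campo_presente(props, candidatos):
--     """Devuelve el primer campo de `candidatos` que exista en `props` (case-insensitive)."""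
--     rank = {}
--     for i, c in enumerate(candidatos):
--         rank.setdefault(c.lower(), i)
--     best, best_rank = None, len(candidatos)
--     for k in props:
--         r = rank.get(k.lower())
--         if r is not None and r < best_rank:
--             best, best_rank = k, r
--     return best
-- ===== Notes on version B (the rewrite author's own statement) =====
-- stated objective: alternative
-- what changed: Inverts the loops: instead of building a lowercase->key dict over props and probing it candidate by candidate, B builds a priority-rank dict over the candidates once and makes a single pass over the keys keeping the best-ranked key; Pre_ excludes props whose keys collide after lowercasing, where A's dict-overwrite (last colliding key) and B's first-match are equally accidental choices.
-- outside the precondition, e.g. on _primer_campo_presente({'A': '1', 'a': '2'}, ['a']): A returns 'a', B returns 'A'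
import Mathlib
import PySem

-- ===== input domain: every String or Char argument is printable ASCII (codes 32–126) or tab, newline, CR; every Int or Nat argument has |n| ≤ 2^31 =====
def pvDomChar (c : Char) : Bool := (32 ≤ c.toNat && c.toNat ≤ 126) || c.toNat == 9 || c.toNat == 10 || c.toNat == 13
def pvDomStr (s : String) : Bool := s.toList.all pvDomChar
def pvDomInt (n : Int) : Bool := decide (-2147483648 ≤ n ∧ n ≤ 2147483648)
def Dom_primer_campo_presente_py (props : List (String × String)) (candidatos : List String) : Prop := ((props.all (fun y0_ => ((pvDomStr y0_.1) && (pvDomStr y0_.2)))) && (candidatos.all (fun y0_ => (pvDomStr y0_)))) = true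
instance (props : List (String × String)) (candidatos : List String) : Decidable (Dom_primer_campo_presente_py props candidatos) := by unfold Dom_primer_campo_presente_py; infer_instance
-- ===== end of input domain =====

-- B inverts the loops: one pass over the keys, ranking each key by the position of its
-- lowercased form among the lowercased candidates and keeping the best-ranked key.

-- ===== PORT A =====
-- the 'for cand in candidatos' loop of A, looking up cand.lower() in props_lower
def pvLoopA (d : PySem.Dict String String) : List String → Option String
  | [] => none
  | c :: rest =>
      match d.get? (PySem.Str.lower c) with
      | some k => some k
      | none => pvLoopA d rest

def primer_campo_presente_py (props : List (String × String)) (candidatos : List String) : Option String :=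
  if props = [] then none
  else
    -- props_lower = {k.lower(): k for k in props.keys()}
    let props_lower : PySem.Dict String String :=
      (props.map Prod.fst).foldl (fun d k => d.insert (PySem.Str.lower k) k) PySem.Dict.empty
    pvLoopA props_lower candidatos

-- ===== PORT B =====
-- rank = {}; for i, c in enumerate(candidatos): rank.setdefault(c.lower(), i)
-- (setdefault ported by hand: insert only when the key is absent — exact for dict.setdefault)
def pvRankDict (candidatos : List String) : PySem.Dict String Int :=
  (PySem.List.enumerate candidatos).foldl
    (fun d ic => if (d.get? (PySem.Str.lower ic.2)).isNone
                 then d.insert (PySem.Str.lower ic.2) ic.1 else d)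
    PySem.Dict.empty

-- one iteration of B's 'for k in props' loop:
-- r = rank.get(k.lower()); if r is not None and r < best_rank: best, best_rank = k, r
def pvBestStep (rank : PySem.Dict String Int) (st : Option String × Int) (kv : String × String) : Option String × Int :=
  match rank.get? (PySem.Str.lower kv.1) with
  | none => st
  | some r => if r < st.2 then (some kv.1, r) else st

def primer_campo_presente_py_alt (props : List (String × String)) (candidatos : List String) : Option String :=
  let rank := pvRankDict candidatos
  (props.foldl (pvBestStep rank) (none, (candidatos.length : Int))).1

-- ===== PRECONDITION & SPEC =====
-- Pre_ excludes props whose keys collide after lowercasing: there A's last-wins dict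
-- overwrite and B's first match are equally accidental choices on an unspecified corner.
def Pre_primer_campo_presente_py (props : List (String × String)) (candidatos : List String) : Prop :=
  (props.map (fun p => PySem.Str.lower p.1)).Nodup
instance (props : List (String × String)) (candidatos : List String) : Decidable (Pre_primer_campo_presente_py props candidatos) := by unfold Pre_primer_campo_presente_py; infer_instance

def pvWitness_primer_campo_presente_py : (List (String × String)) × List String :=
  ([("Nombre", "Bogota"), ("COD", "11")], ["cod", "codigo"])

def Spec_primer_campo_presente_py (props : List (String × String)) (candidatos : List String) (out : Option String) : Prop := out = primer_campo_presente_py_alt props candidatos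
instance (props : List (String × String)) (candidatos : List String) (out : Option String) : Decidable (Spec_primer_campo_presente_py props candidatos out) := by unfold Spec_primer_campo_presente_py; infer_instance

-- ===== CLAIM (what is proved, stated in full; the proofs are below) =====
def Claim_equal_primer_campo_presente_py : Prop := ∀ (props : List (String × String)) (candidatos : List String), Dom_primer_campo_presente_py props candidatos → Pre_primer_campo_presente_py props candidatos → Spec_primer_campo_presente_py props candidatos (primer_campo_presente_py props candidatos)

-- ===== LEMMAS AND PROOFS =====

-- first key in claves whose lower() is cl (proof-side characterisation of A's dict lookup)
def pvScan (cl : String) : List String → Option String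
  | [] => none
  | k :: rest => if PySem.Str.lower k = cl then some k else pvScan cl rest

def pvLoopB (claves : List String) : List String → Option String
  | [] => none
  | c :: rest =>
      match pvScan (PySem.Str.lower c) claves with
      | some k => some k
      | none => pvLoopB claves rest

-- B's fold, over the bare key list
def pvFold (L : List String) (keys : List String) (st : Option String × Int) : Option String × Int :=
  keys.foldl (fun st k =>
    match PySem.List.index? L (PySem.Str.lower k) with
    | none => st
    | some r => if (r : Int) < st.2 then (some k, (r : Int)) else st) st

-- the setdefault fold builds exactly 'first index of q among the lowered candidates, offset by s'
theorem pv_rank_get (cs : List String) : ∀ (s : Int) (d : PySem.Dict String Int) (q : String),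
    ((PySem.List.enumerate cs s).foldl
      (fun d ic => if (d.get? (PySem.Str.lower ic.2)).isNone
                   then d.insert (PySem.Str.lower ic.2) ic.1 else d) d).get? q
    = (d.get? q).or ((PySem.List.index? (cs.map PySem.Str.lower) q).map (fun n => s + (n : Int))) := by
  induction cs with
  | nil => intro s d q; simp [PySem.List.enumerate]
  | cons c rest ih =>
      intro s d q
      rw [PySem.List.enumerate_cons, List.foldl_cons]
      dsimp only
      rcases eq_or_ne (PySem.Str.lower c) q with hq | hq
      · subst hq
        rw [List.map_cons, PySem.List.index?_cons_self]
        cases hd : d.get? (PySem.Str.lower c) with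
        | none =>
            rw [if_pos (show (none : Option Int).isNone = true from rfl), ih]
            rw [PySem.Dict.get?_insert, if_pos rfl]
            simp
        | some v =>
            rw [if_neg (show ¬ (some v : Option Int).isNone = true by simp), ih, hd]
            simp
      · rw [List.map_cons, PySem.List.index?_cons_of_ne _ hq]
        have hd' : ∀ d' : PySem.Dict String Int,
            (if (d.get? (PySem.Str.lower c)).isNone
             then d.insert (PySem.Str.lower c) s else d) = d' →
            d'.get? q = d.get? q := by
          intro d' he
          subst he
          split_ifs
          · rw [PySem.Dict.get?_insert, if_neg (Ne.symm hq)]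
          · rfl
        rw [ih, hd' _ rfl]
        cases PySem.List.index? (rest.map PySem.Str.lower) q <;> simp <;> ring

-- B's fold over the dict = pvFold over the bare key list
theorem pv_fold_rank (L : List String) (rank : PySem.Dict String Int)
    (h : ∀ q, rank.get? q = (PySem.List.index? L q).map (fun n => (n : Int))) :
    ∀ (props : List (String × String)) (st : Option String × Int),
    props.foldl (pvBestStep rank) st = pvFold L (props.map Prod.fst) st := by
  intro props
  induction props with
  | nil => intro st; rfl
  | cons kv rest ih =>
      intro st
      rw [List.foldl_cons, List.map_cons]
      unfold pvFold
      rw [List.foldl_cons]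
      unfold pvBestStep
      rw [h]
      cases PySem.List.index? L (PySem.Str.lower kv.1) with
      | none => exact ih st
      | some r => exact ih _

theorem pvScan_append (cl : String) (l1 l2 : List String) :
    pvScan cl (l1 ++ l2) = (pvScan cl l1).or (pvScan cl l2) := by
  induction l1 with
  | nil => simp [pvScan]
  | cons k rest ih =>
      simp only [List.cons_append, pvScan, ih]
      split_ifs <;> simp

-- lookup in the dict A builds = reverse scan over the keys, falling back to the start dict
theorem pv_get_foldl (xs : List String) (d : PySem.Dict String String) (q : String) :
    ((xs.foldl (fun d k => d.insert (PySem.Str.lower k) k) d).get? q)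
      = (pvScan q xs.reverse).or (d.get? q) := by
  induction xs generalizing d with
  | nil => simp [pvScan]
  | cons k rest ih =>
      simp only [List.foldl_cons, List.reverse_cons, ih, pvScan_append, Option.or_assoc]
      congr 1
      rw [PySem.Dict.get?_insert]
      simp only [pvScan]
      rcases eq_or_ne q (PySem.Str.lower k) with h | h
      · rw [if_pos h, if_pos h.symm, Option.some_or]
      · rw [if_neg h, if_neg (Ne.symm h), Option.none_or]

theorem pvScan_none_of_not_mem (q : String) (xs : List String)
    (h : q ∉ xs.map PySem.Str.lower) : pvScan q xs = none := by
  induction xs with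
  | nil => rfl
  | cons k rest ih =>
      simp only [List.map_cons, List.mem_cons, not_or] at h
      have hne : PySem.Str.lower k ≠ q := fun hk => h.1 hk.symm
      simp only [pvScan, if_neg hne]
      exact ih h.2

theorem pvScan_some (q : String) (xs : List String) (k : String)
    (h : pvScan q xs = some k) : k ∈ xs ∧ PySem.Str.lower k = q := by
  induction xs with
  | nil => simp [pvScan] at h
  | cons x rest ih =>
      simp only [pvScan] at h
      split_ifs at h with hx
      · cases h; exact ⟨List.mem_cons_self, hx⟩
      · obtain ⟨hm, hl⟩ := ih h; exact ⟨List.mem_cons_of_mem _ hm, hl⟩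

theorem pvScan_reverse (keys : List String)
    (hnd : (keys.map PySem.Str.lower).Nodup) (q : String) :
    pvScan q keys.reverse = pvScan q keys := by
  induction keys with
  | nil => rfl
  | cons k rest ih =>
      simp only [List.map_cons, List.nodup_cons] at hnd
      rw [List.reverse_cons, pvScan_append]
      simp only [pvScan]
      rcases eq_or_ne (PySem.Str.lower k) q with h | h
      · subst h
        rw [pvScan_none_of_not_mem _ rest.reverse (by simpa using hnd.1),
            pvScan_none_of_not_mem _ rest hnd.1]
        simp
      · rw [if_neg h, ih hnd.2]
        simp only [if_neg h]
        simp

theorem pv_loop_eq (claves : List String) (d : PySem.Dict String String)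
    (h : ∀ q, d.get? q = pvScan q claves) (cs : List String) :
    pvLoopA d cs = pvLoopB claves cs := by
  induction cs with
  | nil => rfl
  | cons c rest ih => simp only [pvLoopA, pvLoopB, h, ih]

theorem pvFold_nil_L (keys : List String) (st : Option String × Int) :
    pvFold [] keys st = st := by
  induction keys generalizing st with
  | nil => rfl
  | cons k rest ih =>
      simp only [pvFold, List.foldl_cons] at *
      rw [show PySem.List.index? ([] : List String) (PySem.Str.lower k) = none by
        simp]
      exact ih st

-- once the best rank is 0, nothing can improve it
theorem pvFold_stuck (L : List String) (keys : List String) (k0 : String) :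
    (pvFold L keys (some k0, 0)).1 = some k0 := by
  induction keys with
  | nil => rfl
  | cons k rest ih =>
      simp only [pvFold, List.foldl_cons] at *
      cases h : PySem.List.index? L (PySem.Str.lower k) with
      | none => exact ih
      | some r =>
          dsimp only
          rw [if_neg (by omega : ¬ ((r : Int) < 0))]
          exact ih

-- if k0 is in keys with rank 0, and it is the only key of rank 0, the fold returns k0
theorem pv_zero (L : List String) (keys : List String) (k0 : String) :
    ∀ (acc : Option String) (b : Int), 0 < b → k0 ∈ keys →
    PySem.List.index? L (PySem.Str.lower k0) = some 0 →
    (∀ k ∈ keys, PySem.List.index? L (PySem.Str.lower k) = some 0 → k = k0) →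
    (pvFold L keys (acc, b)).1 = some k0 := by
  induction keys with
  | nil => intro _ _ _ hmem _ _; simp at hmem
  | cons k rest ih =>
      intro acc b hb hmem h0 huniq
      simp only [pvFold, List.foldl_cons]
      rcases eq_or_ne k k0 with hk | hk
      · subst hk
        rw [h0]
        dsimp only
        simp only [Nat.cast_zero]
        rw [if_pos hb]
        exact pvFold_stuck L rest k
      · have hmem' : k0 ∈ rest := by
          rcases List.mem_cons.mp hmem with h | h
          · exact absurd h.symm hk
          · exact h
        have huniq' : ∀ x ∈ rest, PySem.List.index? L (PySem.Str.lower x) = some 0 → x = k0 :=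
          fun x hx => huniq x (List.mem_cons_of_mem _ hx)
        cases hr : PySem.List.index? L (PySem.Str.lower k) with
        | none => exact ih acc b hb hmem' h0 huniq'
        | some r =>
            have hrne : r ≠ 0 := fun h => hk (huniq k List.mem_cons_self (h ▸ hr))
            have hrpos : (0 : Int) < (r : Int) := by
              exact_mod_cast Nat.pos_of_ne_zero hrne
            dsimp only
            split_ifs with hlt
            · exact ih (some k) (r : Int) hrpos hmem' h0 huniq'
            · exact ih acc b hb hmem' h0 huniq'

-- if no key matches x, prepending x to L shifts every rank and the bound by one
theorem pv_shift (L : List String) (x : String) (keys : List String) :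
    ∀ (acc : Option String) (b : Int),
    (∀ k ∈ keys, PySem.Str.lower k ≠ x) →
    pvFold (x :: L) keys (acc, b + 1) = ((pvFold L keys (acc, b)).1, (pvFold L keys (acc, b)).2 + 1) := by
  induction keys with
  | nil => intro acc b _; rfl
  | cons k rest ih =>
      intro acc b hne
      have hk : PySem.Str.lower k ≠ x := hne k List.mem_cons_self
      have hrest : ∀ k' ∈ rest, PySem.Str.lower k' ≠ x :=
        fun k' h => hne k' (List.mem_cons_of_mem _ h)
      simp only [pvFold, List.foldl_cons]
      rw [PySem.List.index?_cons_of_ne _ (Ne.symm hk)]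
      cases hr : PySem.List.index? L (PySem.Str.lower k) with
      | none => exact ih acc b hrest
      | some r =>
          simp only [Option.map_some]
          have hcast : ((r + 1 : Nat) : Int) = (r : Int) + 1 := by push_cast; ring
          rcases lt_or_ge (r : Int) b with hlt | hge
          · rw [if_pos (by omega), if_pos hlt, hcast]
            exact ih (some k) (r : Int) hrest
          · rw [if_neg (by omega), if_neg (by omega)]
            exact ih acc b hrest

theorem pvScan_ne_none_of_mem (q k : String) (keys : List String)
    (hk : k ∈ keys) (hl : PySem.Str.lower k = q) : pvScan q keys ≠ none := by
  induction keys with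
  | nil => simp at hk
  | cons k' rest ih =>
      simp only [pvScan]
      rcases List.mem_cons.mp hk with h | h
      · subst h; rw [if_pos hl]; simp
      · split_ifs with h'
        · simp
        · exact ih h

-- main bridge: B's key-major rank fold computes A's candidate-major first match
theorem pv_main (cs : List String) (keys : List String)
    (hnd : (keys.map PySem.Str.lower).Nodup) :
    (pvFold (cs.map PySem.Str.lower) keys (none, (cs.length : Int))).1 = pvLoopB keys cs := by
  induction cs with
  | nil =>
      rw [List.map_nil, pvFold_nil_L]
      induction keys with
      | nil => rfl
      | cons k rest ih => simpa [pvLoopB, pvScan] using ih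
  | cons c rest ih =>
      cases hscan : pvScan (PySem.Str.lower c) keys with
      | none =>
          have hne : ∀ k ∈ keys, PySem.Str.lower k ≠ PySem.Str.lower c :=
            fun k hk heq => pvScan_ne_none_of_mem _ k keys hk heq hscan
          simp only [pvLoopB, hscan, List.map_cons, List.length_cons]
          rw [show ((rest.length + 1 : Nat) : Int) = (rest.length : Int) + 1 by push_cast; ring]
          rw [pv_shift _ _ _ _ _ hne]
          exact ih
      | some k0 =>
          obtain ⟨hmem, hl⟩ := pvScan_some _ _ _ hscan
          simp only [pvLoopB, hscan, List.map_cons, List.length_cons]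
          have h0 : PySem.List.index? (PySem.Str.lower c :: rest.map PySem.Str.lower)
              (PySem.Str.lower k0) = some 0 := by
            rw [hl]; exact PySem.List.index?_cons_self _ _
          have huniq : ∀ k ∈ keys,
              PySem.List.index? (PySem.Str.lower c :: rest.map PySem.Str.lower)
                (PySem.Str.lower k) = some 0 → k = k0 := by
            intro k hk hidx
            rcases eq_or_ne (PySem.Str.lower c) (PySem.Str.lower k) with he | he
            · have : PySem.Str.lower k = PySem.Str.lower k0 := by rw [← he, hl]
              exact List.inj_on_of_nodup_map hnd hk hmem this
            · rw [PySem.List.index?_cons_of_ne _ he] at hidx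
              cases h' : PySem.List.index? (rest.map PySem.Str.lower) (PySem.Str.lower k) with
              | none => rw [h'] at hidx; simp at hidx
              | some r => rw [h'] at hidx; simp at hidx
          exact pv_zero _ keys k0 none _ (by positivity) hmem h0 huniq

-- ===== VERDICT (by name: the statement is the Claim_ definition above) =====
theorem primer_campo_presente_py_spec : Claim_equal_primer_campo_presente_py := by
  intro props candidatos _ hpre
  unfold Spec_primer_campo_presente_py primer_campo_presente_py primer_campo_presente_py_alt
  have hnd : ((props.map Prod.fst).map PySem.Str.lower).Nodup := by
    unfold Pre_primer_campo_presente_py at hpre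
    simpa [List.map_map, Function.comp] using hpre
  split_ifs with h
  · subst h; rfl
  · show pvLoopA _ candidatos
      = (props.foldl (pvBestStep (pvRankDict candidatos)) (none, (candidatos.length : Int))).1
    have hrank : ∀ q, (pvRankDict candidatos).get? q
        = (PySem.List.index? (candidatos.map PySem.Str.lower) q).map (fun n => (n : Int)) := by
      intro q
      unfold pvRankDict
      rw [pv_rank_get]
      cases PySem.List.index? (candidatos.map PySem.Str.lower) q <;> simp [PySem.Dict.get?, PySem.Dict.empty]
    rw [pv_fold_rank _ _ hrank props _, pv_main candidatos (props.map Prod.fst) hnd]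
    refine pv_loop_eq _ _ (fun q => ?_) candidatos
    rw [pv_get_foldl, pvScan_reverse _ hnd]
    simp
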